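-- pv_equiv track=rewrite | github.com/andros-research/ai-evaluation-harness | benchmarks/summarize_audits.py | infer_prompt_from_linked_claims
-- ===== SOURCE A (Python) =====
-- from typing import Any
--
-- def infer_prompt_from_linked_claims(linked_claims: list[dict[str, Any]]) -> str:
--     prompts = sorted(
--         {str(c.get("prompt_id")) for c in linked_claims if c.get("prompt_id") is not None}
--     )
--     if len(prompts) == 1:
--         return prompts[0]
--     if len(prompts) > 1:
--         return "MULTI"
--     return ""
-- ===== SOURCE B (Python) =====
-- def infer_prompt_from_linked_claims(linked_claims):
--     found = None
--     multi = False
--     for c in linked_claims: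
--         p = c.get("prompt_id")
--         if p is None:
--             continue
--         s = str(p)
--         if found is None:
--             found = s
--         elif s != found:
--             multi = True
--     if multi:
--         return "MULTI"
--     return found if found is not None else ""
-- ===== Notes on version B (the rewrite author's own statement) =====
-- stated objective: simpler
-- what changed: Replaces the set-comprehension-then-sort with a single pass keeping the first stringified prompt_id and a boolean multi flag set when a different value appears.
import Mathlib
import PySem

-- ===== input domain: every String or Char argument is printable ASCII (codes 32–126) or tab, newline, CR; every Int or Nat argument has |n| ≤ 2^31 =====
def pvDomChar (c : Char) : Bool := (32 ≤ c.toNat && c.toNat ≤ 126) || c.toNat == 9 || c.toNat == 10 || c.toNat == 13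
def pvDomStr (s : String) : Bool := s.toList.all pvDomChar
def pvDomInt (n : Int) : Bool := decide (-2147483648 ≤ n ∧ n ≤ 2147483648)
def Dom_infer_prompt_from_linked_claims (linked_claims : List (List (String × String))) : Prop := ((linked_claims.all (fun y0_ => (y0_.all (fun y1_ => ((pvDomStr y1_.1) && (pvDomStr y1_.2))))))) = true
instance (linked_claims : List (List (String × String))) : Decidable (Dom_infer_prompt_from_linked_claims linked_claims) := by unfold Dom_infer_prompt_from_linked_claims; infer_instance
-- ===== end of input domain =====

-- B replaces A's build-a-set-then-sort with one pass keeping the first value and a "multi" flag (simpler decomposition).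
-- Dict lookup c.get("prompt_id") is ported as first-match find? on the association list; under the type
-- convention dict values are strings, so Python's str(...) on them is the identity.

-- ===== PORT A =====
def infer_prompt_from_linked_claims (linked_claims : List (List (String × String))) : String :=
  let prompts :=
    PySem.List.sorted
      (linked_claims.foldl
        (fun s c =>
          match (c.find? (fun p => p.1 == "prompt_id")).map (fun p => p.2) with
          | some v => PySem.Set.add s v
          | none => s)
        ([] : PySem.Set String))
      (fun x => x) false
  if prompts.length = 1 then (PySem.List.pyGet? prompts 0).getD ""
  else if prompts.length > 1 then "MULTI"
  else ""

-- ===== PORT B =====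
def infer_prompt_from_linked_claims_alt (linked_claims : List (List (String × String))) : String :=
  let st := linked_claims.foldl
    (fun (st : Option String × Bool) c =>
      match (c.find? (fun p => p.1 == "prompt_id")).map (fun p => p.2) with
      | none => st
      | some s =>
        match st.1 with
        | none => (some s, st.2)
        | some f => if s ≠ f then (some f, true) else st)
    ((none, false) : Option String × Bool)
  if st.2 then "MULTI"
  else match st.1 with
       | some f => f
       | none => ""

-- ===== PRECONDITION & SPEC =====
def Spec_infer_prompt_from_linked_claims (linked_claims : List (List (String × String))) (out : String) : Prop := out = infer_prompt_from_linked_claims_alt linked_claims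
instance (linked_claims : List (List (String × String))) (out : String) : Decidable (Spec_infer_prompt_from_linked_claims linked_claims out) := by unfold Spec_infer_prompt_from_linked_claims; infer_instance

-- ===== CLAIM (what is proved, stated in full; the proofs are below) =====
def Claim_equal_infer_prompt_from_linked_claims : Prop := ∀ (linked_claims : List (List (String × String))), Dom_infer_prompt_from_linked_claims linked_claims → Spec_infer_prompt_from_linked_claims linked_claims (infer_prompt_from_linked_claims linked_claims)

-- ===== LEMMAS AND PROOFS =====

-- the list of present prompt_id values, in order
def pvVals (linked_claims : List (List (String × String))) : List String :=
  linked_claims.filterMap (fun c => (c.find? (fun p => p.1 == "prompt_id")).map (fun p => p.2))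

lemma pvFoldA (lc : List (List (String × String))) (s : PySem.Set String) :
    lc.foldl
      (fun s c =>
        match (c.find? (fun p => p.1 == "prompt_id")).map (fun p => p.2) with
        | some v => PySem.Set.add s v
        | none => s) s
    = (pvVals lc).foldl PySem.Set.add s := by
  induction lc generalizing s with
  | nil => rfl
  | cons c t ih =>
    simp only [List.foldl_cons, pvVals, List.filterMap_cons]
    cases (c.find? (fun p => p.1 == "prompt_id")).map (fun p => p.2) with
    | none => simpa [pvVals] using ih s
    | some v => simpa [pvVals] using ih (PySem.Set.add s v)

lemma pvFoldB (lc : List (List (String × String))) (st : Option String × Bool) :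
    lc.foldl
      (fun (st : Option String × Bool) c =>
        match (c.find? (fun p => p.1 == "prompt_id")).map (fun p => p.2) with
        | none => st
        | some s =>
          match st.1 with
          | none => (some s, st.2)
          | some f => if s ≠ f then (some f, true) else st) st
    = (pvVals lc).foldl
        (fun (st : Option String × Bool) s =>
          match st.1 with
          | none => (some s, st.2)
          | some f => if s ≠ f then (some f, true) else st) st := by
  induction lc generalizing st with
  | nil => rfl
  | cons c t ih =>
    simp only [List.foldl_cons, pvVals, List.filterMap_cons]
    cases (c.find? (fun p => p.1 == "prompt_id")).map (fun p => p.2) with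
    | none => simpa [pvVals] using ih st
    | some v => simpa [pvVals] using ih _

lemma pvRunB (t : List String) (h : String) (m : Bool) :
    t.foldl
      (fun (st : Option String × Bool) s =>
        match st.1 with
        | none => (some s, st.2)
        | some f => if s ≠ f then (some f, true) else st) (some h, m)
    = (some h, m || t.any (fun v => decide ¬ (v = h))) := by
  induction t generalizing m with
  | nil => simp
  | cons v t ih =>
    simp only [List.foldl_cons, List.any_cons]
    by_cases hv : v = h
    · subst hv
      simpa [decide_not] using ih m
    · simpa [hv, decide_not] using ih true

lemma pvConstFold (h : String) (t : List String) (hall : ∀ v ∈ t, v = h) :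
    t.foldl PySem.Set.add [h] = [h] := by
  induction t with
  | nil => rfl
  | cons v t ih =>
    have hv := hall v (by simp)
    subst hv
    have hone : PySem.Set.add [v] v = [v] := by simp [PySem.Set.add]
    simp only [List.foldl_cons, hone]
    exact ih (fun w hw => hall w (by simp [hw]))

lemma pvTwoLen {l : List String} {a b : String} (ha : a ∈ l) (hb : b ∈ l) (hne : a ≠ b) :
    1 < l.length := by
  match l with
  | [] => simp at ha
  | [x] =>
    rw [List.mem_singleton] at ha hb
    exact absurd (ha.trans hb.symm) hne
  | x :: y :: t => simp

lemma pvCore (lc : List (List (String × String))) :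
    infer_prompt_from_linked_claims lc = infer_prompt_from_linked_claims_alt lc := by
  unfold infer_prompt_from_linked_claims infer_prompt_from_linked_claims_alt
  rw [pvFoldA, pvFoldB]
  cases hvs : pvVals lc with
  | nil => rfl
  | cons h t =>
    have hadd0 : PySem.Set.add ([] : PySem.Set String) h = [h] := by
      simp [PySem.Set.add]
    simp only [List.foldl_cons, hadd0, pvRunB]
    by_cases hall : ∀ v ∈ t, v = h
    · have hany : t.any (fun v => decide ¬ (v = h)) = false := by
        simp only [List.any_eq_false]
        intro v hv; simpa using hall v hv
      have hsort : PySem.List.sorted [h] (fun x => x) false = [h] :=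
        PySem.List.sorted_eq_self_of_pairwise [h] (fun x => x) (by simp)
      simp only [pvConstFold h t hall, hany, hsort]
      simp [PySem.List.pyGet?, PySem.List.pyIdx?]
    · rw [not_forall] at hall
      simp only [not_forall, exists_prop] at hall
      obtain ⟨v, hv, hvne⟩ := hall
      have hany : t.any (fun w => decide ¬ (w = h)) = true := by
        simp only [List.any_eq_true]
        exact ⟨v, hv, by simpa using hvne⟩
      have hset : List.foldl PySem.Set.add [h] t = PySem.Set.ofList (h :: t) := rfl
      have hmemh : h ∈ PySem.List.sorted (List.foldl PySem.Set.add [h] t) (fun x => x) false := by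
        rw [hset, PySem.List.mem_sorted, PySem.Set.mem_ofList]; simp
      have hmemv : v ∈ PySem.List.sorted (List.foldl PySem.Set.add [h] t) (fun x => x) false := by
        rw [hset, PySem.List.mem_sorted, PySem.Set.mem_ofList]; simp [hv]
      have hlen := pvTwoLen hmemh hmemv (fun e => hvne e.symm)
      rw [hany, if_neg (by omega), if_pos hlen]
      simp

-- ===== VERDICT (by name: the statement is the Claim_ definition above) =====
theorem infer_prompt_from_linked_claims_spec : Claim_equal_infer_prompt_from_linked_claims := by
  intro lc _
  unfold Spec_infer_prompt_from_linked_claims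
  exact pvCore lc
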